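-- pv_equiv track=rewrite | github.com/FelixNgFender/college-code | Year 0/CS61A Berkeley/homework/hw03/hw03/hw03.py | missing_digits
-- ===== SOURCE A (Python) =====
-- def missing_digits(n, prev_last = 0):
--     """Given a number a that is in sorted, increasing order,
--     return the number of missing digits in n. A missing digit is
--     a number between the first and last digit of a that is not in n.
--     >>> missing_digits(1248) # 3, 5, 6, 7
--     4
--     >>> missing_digits(1122) # No missing numbers
--     0
--     >>> missing_digits(123456) # No missing numbers
--     0
--     >>> missing_digits(3558) # 4, 6, 7
--     3
--     >>> missing_digits(4) # No missing numbers between 4 and 4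
--     0
--     """
--     "*** YOUR CODE HERE ***"
--     last, all_but_last = n % 10, n // 10
--     if (len(str(n)) == 1 and prev_last - n < 2) or n == 0:
--         return 0
--     elif prev_last == 0 or prev_last - last < 2:
--         return missing_digits(all_but_last, last)
--     else:
--         return prev_last - last - 1 + missing_digits(all_but_last, last)
-- ===== SOURCE B (Python) =====
-- def missing_digits(n, prev_last=0):
--     total = 0
--     while not ((0 <= n <= 9 and prev_last - n < 2) or n == 0):
--         last = n % 10
--         if prev_last != 0 and prev_last - last >= 2:
--             total += prev_last - last - 1
--         prev_last, n = last, n // 10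
--     return total
-- ===== Notes on version B (the rewrite author's own statement) =====
-- stated objective: alternative
-- what changed: A's accumulator-passing recursion is replaced by an iterative while loop that keeps prev_last and a running total and adds the gap prev_last - last - 1 per digit.
import Mathlib
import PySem

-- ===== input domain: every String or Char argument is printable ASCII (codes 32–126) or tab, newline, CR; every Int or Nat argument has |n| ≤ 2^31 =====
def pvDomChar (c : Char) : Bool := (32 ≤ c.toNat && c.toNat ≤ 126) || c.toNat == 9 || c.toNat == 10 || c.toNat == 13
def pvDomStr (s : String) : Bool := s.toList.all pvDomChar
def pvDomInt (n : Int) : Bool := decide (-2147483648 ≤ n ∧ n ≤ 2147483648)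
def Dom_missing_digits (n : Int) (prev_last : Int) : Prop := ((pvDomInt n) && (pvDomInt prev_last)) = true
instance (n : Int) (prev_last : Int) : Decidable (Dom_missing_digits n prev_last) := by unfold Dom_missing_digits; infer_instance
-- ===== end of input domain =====

-- B replaces A's accumulator-passing recursion by an iterative tail loop carrying a running total
-- (objective: alternative decomposition, same cost).


-- ===== PORT A =====
-- Literal port of A's recursion. For n < 0 the Python recursion never reaches a base case
-- (RecursionError); the leading 'if n < 0' is a totality guard only, excluded by Pre_.
def missing_digits (n : Int) (prev_last : Int) : Int :=
  if n < 0 then 0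
  else
    -- last = n % 10, all_but_last = n // 10 (inlined)
    if (PySem.Str.len (PySem.Int.toStr n) = 1 ∧ prev_last - n < 2) ∨ n = 0 then 0
    else if prev_last = 0 ∨ prev_last - PySem.Int.mod n 10 < 2 then
      missing_digits (PySem.Int.floordiv n 10) (PySem.Int.mod n 10)
    else
      prev_last - PySem.Int.mod n 10 - 1 + missing_digits (PySem.Int.floordiv n 10) (PySem.Int.mod n 10)
termination_by n.toNat
decreasing_by
  all_goals
    simp only [PySem.Int.floordiv_eq_ediv_of_pos (by omega : (0:Int) < 10)]
    omega

-- ===== PORT B =====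
-- The while loop of Source B as a tail recursion over the state (n, prev_last, total).
-- For n < 0 the Python loop never exits; the 'n < 0' branch is a totality guard only.
def mdLoop (n : Int) (prev_last : Int) (total : Int) : Int :=
  if (0 ≤ n ∧ n ≤ 9 ∧ prev_last - n < 2) ∨ n = 0 then total
  else if n < 0 then total
  else
    -- last = n % 10 (inlined); updated total, prev_last, n
    mdLoop (PySem.Int.floordiv n 10) (PySem.Int.mod n 10)
      (if prev_last ≠ 0 ∧ prev_last - PySem.Int.mod n 10 ≥ 2
       then total + (prev_last - PySem.Int.mod n 10 - 1) else total)
termination_by n.toNat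
decreasing_by
  simp only [PySem.Int.floordiv_eq_ediv_of_pos (by omega : (0:Int) < 10)]
  omega

def missing_digits_alt (n : Int) (prev_last : Int) : Int := mdLoop n prev_last 0

-- ===== PRECONDITION & SPEC =====
-- Pre_ excludes n < 0, on which the Python A recurses forever (RecursionError).
def Pre_missing_digits (n : Int) (_prev_last : Int) : Prop := 0 ≤ n
instance (n : Int) (prev_last : Int) : Decidable (Pre_missing_digits n prev_last) := by unfold Pre_missing_digits; infer_instance
def pvWitness_missing_digits : Int × Int := (1248, 0)
def Spec_missing_digits (n : Int) (prev_last : Int) (out : Int) : Prop := out = missing_digits_alt n prev_last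
instance (n : Int) (prev_last : Int) (out : Int) : Decidable (Spec_missing_digits n prev_last out) := by unfold Spec_missing_digits; infer_instance

-- ===== CLAIM (what is proved, stated in full; the proofs are below) =====
def Claim_equal_missing_digits : Prop := ∀ (n : Int) (prev_last : Int), Dom_missing_digits n prev_last → Pre_missing_digits n prev_last → Spec_missing_digits n prev_last (missing_digits n prev_last)

-- ===== LEMMAS AND PROOFS =====

-- toDigitsCore never shortens its accumulator
lemma toDigitsCore_len_ge (b : Nat) : ∀ (f n : Nat) (l : List Char),
    l.length ≤ (Nat.toDigitsCore b f n l).length := by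
  intro f
  induction f with
  | zero => intro n l; simp [Nat.toDigitsCore]
  | succ f ih =>
    intro n l
    simp only [Nat.toDigitsCore]
    split
    · simp
    · exact le_trans (by simp) (ih _ _)

lemma toDigits_len_one_iff (m : Nat) : (Nat.toDigits 10 m).length = 1 ↔ m < 10 := by
  constructor
  · intro h
    by_contra hm
    push Not at hm
    obtain ⟨f, rfl⟩ : ∃ f, m = f + 1 := ⟨m - 1, by omega⟩
    simp only [Nat.toDigits, Nat.toDigitsCore] at h
    rw [if_neg (by omega)] at h
    split at h
    · simp at h
    · have h2 := toDigitsCore_len_ge 10 f ((f + 1) / 10 / 10)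
        [((f + 1) / 10 % 10).digitChar, ((f + 1) % 10).digitChar]
      simp only [List.length_cons, List.length_nil] at h2
      omega
  · intro h
    simp only [Nat.toDigits, Nat.toDigitsCore]
    rw [if_pos (Nat.div_eq_of_lt h)]
    simp

lemma len_toStr_one_iff (n : Int) (h : 0 ≤ n) :
    PySem.Str.len (PySem.Int.toStr n) = 1 ↔ n ≤ 9 := by
  rw [PySem.Str.len_eq, PySem.Int.toList_toStr]
  simp only [PySem.Int.toChars, if_neg (by omega : ¬ n < 0)]
  rw [show ((Nat.toDigits 10 n.toNat).length : Int) = 1 ↔ (Nat.toDigits 10 n.toNat).length = 1 by exact_mod_cast Iff.rfl]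
  rw [toDigits_len_one_iff]
  omega

lemma mdLoop_eq (k : Nat) : ∀ (n prev_last total : Int), n.toNat = k → 0 ≤ n →
    mdLoop n prev_last total = total + missing_digits n prev_last := by
  induction k using Nat.strong_induction_on with
  | _ k ih =>
    intro n prev_last total hk hn
    have hA : missing_digits n prev_last =
        (if (PySem.Str.len (PySem.Int.toStr n) = 1 ∧ prev_last - n < 2) ∨ n = 0 then 0
         else if prev_last = 0 ∨ prev_last - PySem.Int.mod n 10 < 2 then
           missing_digits (PySem.Int.floordiv n 10) (PySem.Int.mod n 10)
         else
           prev_last - PySem.Int.mod n 10 - 1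
             + missing_digits (PySem.Int.floordiv n 10) (PySem.Int.mod n 10)) := by
      rw [missing_digits, if_neg (by omega : ¬ n < 0)]
    rw [hA, mdLoop]
    have hbase : ((0 ≤ n ∧ n ≤ 9 ∧ prev_last - n < 2) ∨ n = 0)
        ↔ ((PySem.Str.len (PySem.Int.toStr n) = 1 ∧ prev_last - n < 2) ∨ n = 0) := by
      rw [len_toStr_one_iff n hn]; omega
    by_cases hb : (0 ≤ n ∧ n ≤ 9 ∧ prev_last - n < 2) ∨ n = 0
    · rw [if_pos hb, if_pos (hbase.mp hb)]; ring
    · rw [if_neg hb, if_neg (fun h => hb (hbase.mpr h)), if_neg (by omega : ¬ n < 0)]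
      have hn1 : 1 ≤ n := by omega
      have hfd : PySem.Int.floordiv n 10 = n / 10 :=
        PySem.Int.floordiv_eq_ediv_of_pos (by omega)
      have hrec : ∀ t : Int, mdLoop (PySem.Int.floordiv n 10) (PySem.Int.mod n 10) t
          = t + missing_digits (PySem.Int.floordiv n 10) (PySem.Int.mod n 10) :=
        fun t => ih (PySem.Int.floordiv n 10).toNat (by rw [hfd]; omega)
          (PySem.Int.floordiv n 10) (PySem.Int.mod n 10) t rfl (by rw [hfd]; omega)
      rw [hrec]
      by_cases hc : prev_last = 0 ∨ prev_last - PySem.Int.mod n 10 < 2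
      · rw [if_pos hc,
          if_neg (by omega : ¬ (prev_last ≠ 0 ∧ prev_last - PySem.Int.mod n 10 ≥ 2))]
      · rw [if_neg hc,
          if_pos (by omega : prev_last ≠ 0 ∧ prev_last - PySem.Int.mod n 10 ≥ 2)]
        ring

-- ===== VERDICT (by name: the statement is the Claim_ definition above) =====
theorem missing_digits_spec : Claim_equal_missing_digits := by
  intro n prev_last _ hpre
  unfold Spec_missing_digits missing_digits_alt
  rw [mdLoop_eq n.toNat n prev_last 0 rfl hpre]
  ring
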